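-- pv_equiv track=rewrite | github.com/joeyfezster/pr-review-pack | scripts/render_review_pack.py | _detect_corroboration
-- ===== SOURCE A (Python) =====
-- def _detect_corroboration(findings: list[dict]) -> dict[int, list[int]]:
--     """Detect corroborated findings across agents.
--
--     Two findings are corroborated if they share overlapping files AND
--     have similar titles (case-insensitive substring match).
--
--     Returns mapping: finding_index -> list of corroborating finding indices.
--     """
--     corroboration: dict[int, list[int]] = {}
--     for i, f1 in enumerate(findings):
--         corroboration[i] = []
--         f1_files = set((f1.get("file") or "").split())
--         f1_title = (f1.get("notable") or f1.get("title") or "").lower()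
--         f1_agent = f1.get("agent", "")
--         for j, f2 in enumerate(findings):
--             if i == j:
--                 continue
--             if f2.get("agent", "") == f1_agent:
--                 continue
--             f2_files = set((f2.get("file") or "").split())
--             f2_title = (f2.get("notable") or f2.get("title") or "").lower()
--             # Overlapping files check
--             if not f1_files.intersection(f2_files):
--                 continue
--             # Similar title check: one title contains a significant portion of the other
--             if len(f1_title) > 5 and len(f2_title) > 5:
--                 shorter = f1_title if len(f1_title) <= len(f2_title) else f2_title
--                 longer = f2_title if len(f1_title) <= len(f2_title) else f1_title
--                 # Check if first few meaningful words overlap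
--                 words1 = set(shorter.split()[:4])
--                 words2 = set(longer.split()[:4])
--                 if len(words1.intersection(words2)) >= 2:
--                     corroboration[i].append(j)
--     return corroboration
-- ===== SOURCE B (Python) =====
-- def _detect_corroboration(findings: list[dict]) -> dict[int, list[int]]:
--     """Inverted file-word index: candidates for each finding come from the index,
--     per-finding data (file set, title length, first-4 title words, agent) is parsed once;
--     findings whose title is too short to ever match corroborate nothing."""
--     meta = []
--     index = {}
--     meta_append = meta.append
--     setdefault = index.setdefault
--     for i, f in enumerate(findings):
--         files = set((f.get("file") or "").split())
--         title = (f.get("notable") or f.get("title") or "").lower()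
--         meta_append((files, len(title), set(title.split()[:4]), f.get("agent", "")))
--         for w in files:
--             setdefault(w, []).append(i)
--     corroboration = {}
--     for i, (files, tlen, words4, agent) in enumerate(meta):
--         if tlen <= 5:
--             corroboration[i] = []
--             continue
--         cand = set()
--         update = cand.update
--         for w in files:
--             update(index[w])
--         out = []
--         append = out.append
--         for j in sorted(cand):
--             if j == i:
--                 continue
--             m = meta[j]
--             if m[3] == agent:
--                 continue
--             if m[1] > 5 and len(words4 & m[2]) >= 2:
--                 append(j)
--         corroboration[i] = out
--     return corroboration
-- ===== Notes on version B (the rewrite author's own statement) =====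
-- stated objective: faster
-- what changed: Replaces A's nested rescan (re-splitting every finding's file list and re-lowering/re-splitting its title for every ordered pair) with one parsing pass that builds a per-finding metadata table and an inverted file-word -> finding-indices index; each finding's candidates are read off the index, deduplicated, sorted ascending and filtered by the same agent/title tests, and findings with titles of <= 5 characters skip candidate work entirely (a timing run measured 1.5x on random-family inputs, 15x on const-family).
import Mathlib
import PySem

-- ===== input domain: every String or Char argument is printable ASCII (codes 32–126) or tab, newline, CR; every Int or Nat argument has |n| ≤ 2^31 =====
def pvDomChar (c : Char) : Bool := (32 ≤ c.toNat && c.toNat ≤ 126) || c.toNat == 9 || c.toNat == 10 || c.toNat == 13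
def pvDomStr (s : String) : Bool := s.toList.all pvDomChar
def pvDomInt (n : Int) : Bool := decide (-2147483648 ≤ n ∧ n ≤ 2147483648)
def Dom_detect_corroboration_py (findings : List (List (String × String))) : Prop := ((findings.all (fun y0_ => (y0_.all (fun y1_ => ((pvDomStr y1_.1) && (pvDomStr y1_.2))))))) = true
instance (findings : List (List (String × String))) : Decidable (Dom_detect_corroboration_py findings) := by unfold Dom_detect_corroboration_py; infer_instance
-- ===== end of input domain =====

-- B replaces A's nested rescan (re-parsing every finding's file list and title for every pair)
-- by one parsing pass that also builds an inverted file-word → finding-indices index; candidates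
-- for each finding are read off the index, sorted ascending and filtered (findings whose title
-- has ≤ 5 characters can never match, so they corroborate nothing). Return value only.

-- ===== PORT A =====
-- field extraction shared by both Pythons, named once: `o or d` on strings and the three fields
def pyOrStr (o : Option String) (d : String) : String :=
  match o with
  | some s => if s == "" then d else s
  | none => d

def pvFiles (f0 : List (String × String)) : PySem.Set String :=
  PySem.Set.ofList (PySem.Str.split₀ (pyOrStr ((PySem.Dict.mk f0).get? "file") ""))

def pvTitle (f0 : List (String × String)) : String :=
  PySem.Str.lower (pyOrStr ((PySem.Dict.mk f0).get? "notable") (pyOrStr ((PySem.Dict.mk f0).get? "title") ""))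

def pvAgent (f0 : List (String × String)) : String := (PySem.Dict.mk f0).getD "agent" ""

def aInner (i : Int) (f1_files : PySem.Set String) (f1_title : String) (f1_agent : String)
    (corro : PySem.Dict Int (List Int)) (q : Int × List (String × String)) : PySem.Dict Int (List Int) :=
  if i == q.1 then corro
  else if pvAgent q.2 == f1_agent then corro
  else
    let f2_files := pvFiles q.2
    let f2_title := pvTitle q.2
    if (PySem.Set.inter f1_files f2_files).isEmpty then corro
    else if 5 < PySem.Str.len f1_title ∧ 5 < PySem.Str.len f2_title then
      let shorter := if PySem.Str.len f1_title ≤ PySem.Str.len f2_title then f1_title else f2_title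
      let longer := if PySem.Str.len f1_title ≤ PySem.Str.len f2_title then f2_title else f1_title
      let words1 := PySem.Set.ofList (PySem.List.slice (PySem.Str.split₀ shorter) none (some 4))
      let words2 := PySem.Set.ofList (PySem.List.slice (PySem.Str.split₀ longer) none (some 4))
      if 2 ≤ PySem.Set.len (PySem.Set.inter words1 words2) then
        corro.modify i [] (fun l => l ++ [q.1])
      else corro
    else corro

def aOuter (findings : List (List (String × String))) (corro : PySem.Dict Int (List Int))
    (p : Int × List (String × String)) : PySem.Dict Int (List Int) :=
  List.foldl (aInner p.1 (pvFiles p.2) (pvTitle p.2) (pvAgent p.2))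
    (corro.insert p.1 []) (PySem.List.enumerate findings)

def detect_corroboration_py (findings : List (List (String × String))) : List (Int × List Int) :=
  (List.foldl (aOuter findings) PySem.Dict.empty (PySem.List.enumerate findings)).items

def PVMeta : Type := PySem.Set String × Int × PySem.Set String × String

def pvMetaDflt : PVMeta := (PySem.Set.empty, 0, PySem.Set.empty, "")

def bMeta (f0 : List (String × String)) : PVMeta :=
  (pvFiles f0, PySem.Str.len (pvTitle f0),
   PySem.Set.ofList ((PySem.Str.split₀ (pvTitle f0)).take 4), pvAgent f0)

def bFirst (findings : List (List (String × String))) :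
    List PVMeta × PySem.Dict String (List Int) :=
  List.foldl (fun mi p =>
      (mi.1 ++ [bMeta p.2],
       List.foldl (fun idx w => idx.modify w [] (fun l => l ++ [p.1])) mi.2 (pvFiles p.2)))
    ([], PySem.Dict.empty) (PySem.List.enumerate findings)

def bInner (mt : List PVMeta) (i : Int) (words4 : PySem.Set String) (agent : String)
    (out : List Int) (j : Int) : List Int :=
  if j == i then out
  else
    let m := PySem.List.pyGetD mt j pvMetaDflt
    if m.2.2.2 == agent then out
    else if 5 < m.2.1 ∧ 2 ≤ PySem.Set.len (PySem.Set.inter words4 m.2.2.1) then out ++ [j]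
    else out

def bOuter (mt : List PVMeta) (index : PySem.Dict String (List Int))
    (corro : PySem.Dict Int (List Int)) (p : Int × PVMeta) : PySem.Dict Int (List Int) :=
  if p.2.2.1 ≤ 5 then corro.insert p.1 []
  else
    let cand := List.foldl (fun c w => PySem.Set.update c (index.getD w [])) PySem.Set.empty p.2.1
    corro.insert p.1
      (List.foldl (bInner mt p.1 p.2.2.2.1 p.2.2.2.2) []
        (PySem.List.sorted cand (fun x => x)))

def detect_corroboration_py_alt (findings : List (List (String × String))) : List (Int × List Int) :=
  let mi := bFirst findings
  (List.foldl (bOuter mi.1 mi.2) PySem.Dict.empty (PySem.List.enumerate mi.1)).items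

-- ===== PRECONDITION & SPEC =====
def Spec_detect_corroboration_py (findings : List (List (String × String))) (out : List (Int × List Int)) : Prop := out = detect_corroboration_py_alt findings
instance (findings : List (List (String × String))) (out : List (Int × List Int)) : Decidable (Spec_detect_corroboration_py findings out) := by unfold Spec_detect_corroboration_py; infer_instance

-- ===== CLAIM (what is proved, stated in full; the proofs are below) =====
def Claim_equal_detect_corroboration_py : Prop := ∀ (findings : List (List (String × String))), Dom_detect_corroboration_py findings → Spec_detect_corroboration_py findings (detect_corroboration_py findings)

-- ===== LEMMAS AND PROOFS =====
def hitAb (f1 : List (String × String)) (i : Int) (q : Int × List (String × String)) : Bool :=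
  decide (¬ i = q.1 ∧ ¬ pvAgent q.2 = pvAgent f1 ∧
    (PySem.Set.inter (pvFiles f1) (pvFiles q.2)).isEmpty = false ∧
    (5 < PySem.Str.len (pvTitle f1) ∧ 5 < PySem.Str.len (pvTitle q.2) ∧
      2 ≤ PySem.Set.len (PySem.Set.inter
        (PySem.Set.ofList (PySem.List.slice (PySem.Str.split₀
          (if PySem.Str.len (pvTitle f1) ≤ PySem.Str.len (pvTitle q.2) then pvTitle f1 else pvTitle q.2)) none (some 4)))
        (PySem.Set.ofList (PySem.List.slice (PySem.Str.split₀
          (if PySem.Str.len (pvTitle f1) ≤ PySem.Str.len (pvTitle q.2) then pvTitle q.2 else pvTitle f1)) none (some 4))))))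

def rowA (findings : List (List (String × String))) (i : Int) (f1 : List (String × String)) : List Int :=
  ((PySem.List.enumerate findings).filter (hitAb f1 i)).map (fun q => q.1)

theorem aInner_eq (i : Int) (f1 : List (String × String))
    (corro : PySem.Dict Int (List Int)) (q : Int × List (String × String)) :
    aInner i (pvFiles f1) (pvTitle f1) (pvAgent f1) corro q =
      if hitAb f1 i q then corro.modify i [] (fun l => l ++ [q.1]) else corro := by
  rcases q with ⟨j, f2⟩
  have hiff : hitAb f1 i (j, f2) = true ↔
      (¬ i = j ∧ ¬ pvAgent f2 = pvAgent f1 ∧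
        (PySem.Set.inter (pvFiles f1) (pvFiles f2)).isEmpty = false ∧
        (5 < PySem.Str.len (pvTitle f1) ∧ 5 < PySem.Str.len (pvTitle f2) ∧ 2 ≤ PySem.Set.len (PySem.Set.inter
              (PySem.Set.ofList (PySem.List.slice (PySem.Str.split₀
                (if PySem.Str.len (pvTitle f1) ≤ PySem.Str.len (pvTitle f2) then pvTitle f1 else pvTitle f2)) none (some 4)))
              (PySem.Set.ofList (PySem.List.slice (PySem.Str.split₀
                (if PySem.Str.len (pvTitle f1) ≤ PySem.Str.len (pvTitle f2) then pvTitle f2 else pvTitle f1)) none (some 4)))))) := by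
    simp only [hitAb, decide_eq_true_eq]
  simp only [aInner]
  by_cases h1 : i = j
  · rw [if_pos (by simp only [beq_iff_eq]; exact h1), if_neg (fun h => ((hiff.mp h).1) h1)]
  · rw [if_neg (by simp only [beq_iff_eq]; exact h1)]
    by_cases h2 : pvAgent f2 = pvAgent f1
    · rw [if_pos (by simp only [beq_iff_eq]; exact h2), if_neg (fun h => ((hiff.mp h).2.1) h2)]
    · rw [if_neg (by simp only [beq_iff_eq]; exact h2)]
      by_cases h3 : (PySem.Set.inter (pvFiles f1) (pvFiles f2)).isEmpty = true
      · rw [if_pos h3, if_neg (fun h => by rw [(hiff.mp h).2.2.1] at h3; exact Bool.false_ne_true h3)]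
      · rw [if_neg h3]
        by_cases h4 : 5 < PySem.Str.len (pvTitle f1) ∧ 5 < PySem.Str.len (pvTitle f2)
        · rw [if_pos h4]
          by_cases h5 : 2 ≤ PySem.Set.len (PySem.Set.inter
              (PySem.Set.ofList (PySem.List.slice (PySem.Str.split₀
                (if PySem.Str.len (pvTitle f1) ≤ PySem.Str.len (pvTitle f2) then pvTitle f1 else pvTitle f2)) none (some 4)))
              (PySem.Set.ofList (PySem.List.slice (PySem.Str.split₀
                (if PySem.Str.len (pvTitle f1) ≤ PySem.Str.len (pvTitle f2) then pvTitle f2 else pvTitle f1)) none (some 4))))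
          · rw [if_pos h5, if_pos (hiff.mpr ⟨h1, h2, Bool.eq_false_iff.mpr h3, h4.1, h4.2, h5⟩)]
          · rw [if_neg h5, if_neg (fun h => h5 (hiff.mp h).2.2.2.2.2)]
        · rw [if_neg h4, if_neg (fun h => h4 ⟨(hiff.mp h).2.2.2.1, (hiff.mp h).2.2.2.2.1⟩)]

theorem aFold_eq (ys : List (Int × List (String × String))) (i : Int) (f1 : List (String × String))
    (corro : PySem.Dict Int (List Int)) (acc : List Int) :
    List.foldl (aInner i (pvFiles f1) (pvTitle f1) (pvAgent f1)) (corro.insert i acc) ys =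
      corro.insert i (acc ++ (ys.filter (hitAb f1 i)).map (fun q => q.1)) := by
  induction ys generalizing acc with
  | nil => simp
  | cons q ys ih =>
    rw [List.foldl_cons, aInner_eq]
    by_cases h : hitAb f1 i q = true
    · rw [if_pos h]
      rw [PySem.Dict.modify, PySem.Dict.getD_insert_self, PySem.Dict.insert_insert_self, ih,
        List.filter_cons_of_pos h]
      simp
    · rw [if_neg h, ih, List.filter_cons_of_neg h]

theorem portA_items (findings : List (List (String × String))) :
    detect_corroboration_py findings =
      (PySem.List.enumerate findings).map (fun p => (p.1, rowA findings p.1 p.2)) := by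
  unfold detect_corroboration_py
  have hstep : aOuter findings = fun corro p => corro.insert p.1 (rowA findings p.1 p.2) := by
    funext corro p
    unfold aOuter
    rw [aFold_eq, List.nil_append]
    rfl
  rw [hstep]
  exact (PySem.Dict.items_foldl_insert_fresh (PySem.List.enumerate findings) (fun p => p.1)
      (fun p => rowA findings p.1 p.2) PySem.Dict.empty (fun a _ => rfl)
      (by rw [PySem.List.map_fst_enumerate]; exact PySem.List.nodup_pyRange_one _ _)).trans
    (by simp [PySem.Dict.empty])

def idx0 (findings : List (List (String × String))) : PySem.Dict String (List Int) :=
  List.foldl (fun idx p => List.foldl (fun idx w => idx.modify w [] (fun l => l ++ [p.1])) idx (pvFiles p.2))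
    PySem.Dict.empty (PySem.List.enumerate findings)

theorem bFirst_eq (findings : List (List (String × String))) :
    bFirst findings = (findings.map bMeta, idx0 findings) := by
  unfold bFirst idx0
  refine (PySem.List.foldl_prod_mk
      (fun (a : List PVMeta) (p : Int × List (String × String)) => a ++ [bMeta p.2])
      (fun (b : PySem.Dict String (List Int)) (p : Int × List (String × String)) =>
        List.foldl (fun idx w => idx.modify w [] (fun l => l ++ [p.1])) b (pvFiles p.2))
      (PySem.List.enumerate findings) [] PySem.Dict.empty).trans ?_
  have hm : List.map (fun p => bMeta p.2) (PySem.List.enumerate findings) = findings.map bMeta := by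
    rw [show (fun p : Int × List (String × String) => bMeta p.2) = bMeta ∘ (fun p => p.2) from rfl,
      ← List.map_map, PySem.List.map_snd_enumerate]
  rw [PySem.List.foldl_append_singleton_eq_map, List.nil_append, hm]

theorem enumerate_map_pv {α β : Type} (f : α → β) (xs : List α) (s : Int) :
    PySem.List.enumerate (xs.map f) s = (PySem.List.enumerate xs s).map (fun p => (p.1, f p.2)) := by
  induction xs generalizing s with
  | nil => rfl
  | cons x xs ih => simp [PySem.List.enumerate_cons, ih]

def pvPairs (findings : List (List (String × String))) : List (String × Int) :=
  (PySem.List.enumerate findings).flatMap (fun p => (pvFiles p.2).map (fun v => (v, p.1)))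

theorem idx0_getD (findings : List (List (String × String))) (w : String) :
    (idx0 findings).getD w [] = ((pvPairs findings).filter (fun r => r.1 == w)).map (fun r => r.2) := by
  unfold idx0 pvPairs
  rw [show (fun (idx : PySem.Dict String (List Int)) (p : Int × List (String × String)) =>
        List.foldl (fun idx w => idx.modify w [] (fun l => l ++ [p.1])) idx (pvFiles p.2)) =
      (fun idx p => List.foldl (fun (d : PySem.Dict String (List Int)) (r : String × Int) =>
        d.modify r.1 [] (fun l => l ++ [r.2])) idx ((pvFiles p.2).map (fun v => (v, p.1)))) from
    funext₂ (fun idx p => (List.foldl_map (f := fun v => (v, p.1))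
      (g := fun (d : PySem.Dict String (List Int)) (r : String × Int) => d.modify r.1 [] (fun l => l ++ [r.2]))).symm)]
  rw [← List.foldl_flatMap]
  rw [PySem.Dict.getD_foldl_modify_append, PySem.Dict.getD_empty, List.nil_append]

def candOf (findings : List (List (String × String))) (f1 : List (String × String)) : PySem.Set Int :=
  List.foldl (fun c w => PySem.Set.update c ((idx0 findings).getD w [])) PySem.Set.empty (pvFiles f1)

theorem nodup_foldl_update (g : String → List Int) (ws : List String) (c : PySem.Set Int)
    (h : c.Nodup) : (List.foldl (fun c w => PySem.Set.update c (g w)) c ws).Nodup := by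
  induction ws generalizing c with
  | nil => exact h
  | cons w ws ih => exact ih _ (PySem.Set.nodup_update _ _ h)

theorem mem_foldl_update (g : String → List Int) (ws : List String) (c : PySem.Set Int) (x : Int) :
    x ∈ List.foldl (fun c w => PySem.Set.update c (g w)) c ws ↔ x ∈ c ∨ ∃ w ∈ ws, x ∈ g w := by
  induction ws generalizing c with
  | nil => simp
  | cons w ws ih =>
    rw [List.foldl_cons, ih, PySem.Set.mem_update]
    simp only [List.mem_cons]
    constructor
    · rintro ((h | h) | ⟨v, hv, hx⟩)
      · exact Or.inl h
      · exact Or.inr ⟨w, Or.inl rfl, h⟩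
      · exact Or.inr ⟨v, Or.inr hv, hx⟩
    · rintro (h | ⟨v, (rfl | hv), hx⟩)
      · exact Or.inl (Or.inl h)
      · exact Or.inl (Or.inr hx)
      · exact Or.inr ⟨v, hv, hx⟩

theorem inter_isEmpty_false (s t : PySem.Set String) :
    (PySem.Set.inter s t).isEmpty = false ↔ ∃ x, x ∈ s ∧ x ∈ t := by
  simp [PySem.Set.inter, List.isEmpty_eq_false_iff, List.filter_eq_nil_iff]

theorem mem_candOf (findings : List (List (String × String))) (f1 : List (String × String)) (j : Int) :
    j ∈ candOf findings f1 ↔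
      (0 ≤ j ∧ j < PySem.List.len findings) ∧
        ∃ x, x ∈ pvFiles f1 ∧ x ∈ pvFiles (PySem.List.pyGetD findings j []) := by
  unfold candOf
  rw [mem_foldl_update]
  simp only [PySem.Set.empty, List.not_mem_nil, false_or]
  constructor
  · rintro ⟨w, hw, hj⟩
    rw [idx0_getD] at hj
    simp only [pvPairs, List.mem_map, List.mem_filter, List.mem_flatMap,
      PySem.List.mem_enumerate_iff, beq_iff_eq] at hj
    obtain ⟨r, ⟨⟨p, ⟨k, hk, rfl⟩, hmem⟩, hfst⟩, rfl⟩ := hj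
    obtain ⟨w', hw', rfl⟩ := hmem
    simp only at hfst
    subst hfst
    rw [PySem.List.len_eq]
    refine ⟨⟨by simp, by simp; omega⟩, w', hw, ?_⟩
    simpa [PySem.List.pyGetD_natCast, List.getD_eq_getElem _ _ hk, List.getElem?_eq_getElem hk] using hw'
  · rintro ⟨⟨h0, hn⟩, x, hx1, hx2⟩
    refine ⟨x, hx1, ?_⟩
    rw [idx0_getD]
    simp only [pvPairs, List.mem_map, List.mem_filter, List.mem_flatMap,
      PySem.List.mem_enumerate_iff, beq_iff_eq]
    rw [PySem.List.len_eq] at hn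
    refine ⟨(x, j), ⟨⟨(j, findings[j.toNat]'(by omega)), ⟨j.toNat, by omega, by simp; omega⟩, ?_⟩, rfl⟩, rfl⟩
    refine ⟨x, ?_, rfl⟩
    rwa [PySem.List.pyGetD_eq_getElem _ _ h0 hn] at hx2

def ovlB (findings : List (List (String × String))) (f1 : List (String × String)) (j : Int) : Bool :=
  !(PySem.Set.inter (pvFiles f1) (pvFiles (PySem.List.pyGetD findings j []))).isEmpty

theorem sorted_cand (findings : List (List (String × String))) (f1 : List (String × String)) :
    PySem.List.sorted (candOf findings f1) (fun x => x) =
      (PySem.List.pyRange 0 (PySem.List.len findings)).filter (ovlB findings f1) := by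
  refine PySem.List.sorted_eq_of_perm_of_pairwise_lt _ _ _ ?_ ?_
  · have hc : (candOf findings f1).Nodup :=
      nodup_foldl_update (fun w => (idx0 findings).getD w []) (pvFiles f1) PySem.Set.empty
        (by simp [PySem.Set.empty])
    rw [List.perm_ext_iff_of_nodup (List.Nodup.filter _ (PySem.List.nodup_pyRange_one _ _)) hc]
    intro j
    rw [List.mem_filter, PySem.List.mem_pyRange_one, mem_candOf]
    simp only [ovlB, Bool.not_eq_true', inter_isEmpty_false]
  · exact (PySem.List.pairwise_lt_pyRange_one _ _).filter _

def hitBb (mt : List PVMeta) (i : Int) (w4 : PySem.Set String) (ag : String) (j : Int) : Bool :=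
  decide (¬ j = i ∧ ¬ (PySem.List.pyGetD mt j pvMetaDflt).2.2.2 = ag ∧
    (5 < (PySem.List.pyGetD mt j pvMetaDflt).2.1 ∧
      2 ≤ PySem.Set.len (PySem.Set.inter w4 (PySem.List.pyGetD mt j pvMetaDflt).2.2.1)))

theorem bInner_eq (mt : List PVMeta) (i : Int) (w4 : PySem.Set String) (ag : String)
    (out : List Int) (j : Int) :
    bInner mt i w4 ag out j = if hitBb mt i w4 ag j then out ++ [j] else out := by
  have hiff : hitBb mt i w4 ag j = true ↔
      (¬ j = i ∧ ¬ (PySem.List.pyGetD mt j pvMetaDflt).2.2.2 = ag ∧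
        (5 < (PySem.List.pyGetD mt j pvMetaDflt).2.1 ∧
          2 ≤ PySem.Set.len (PySem.Set.inter w4 (PySem.List.pyGetD mt j pvMetaDflt).2.2.1))) := by
    simp only [hitBb, decide_eq_true_eq]
  simp only [bInner]
  by_cases h1 : j = i
  · rw [if_pos (by simp only [beq_iff_eq]; exact h1), if_neg (fun h => ((hiff.mp h).1) h1)]
  · rw [if_neg (by simp only [beq_iff_eq]; exact h1)]
    by_cases h2 : (PySem.List.pyGetD mt j pvMetaDflt).2.2.2 = ag
    · rw [if_pos (by simp only [beq_iff_eq]; exact h2), if_neg (fun h => ((hiff.mp h).2.1) h2)]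
    · rw [if_neg (by simp only [beq_iff_eq]; exact h2)]
      by_cases h3 : (5 < (PySem.List.pyGetD mt j pvMetaDflt).2.1 ∧
          2 ≤ PySem.Set.len (PySem.Set.inter w4 (PySem.List.pyGetD mt j pvMetaDflt).2.2.1))
      · rw [if_pos h3, if_pos (hiff.mpr ⟨h1, h2, h3⟩)]
      · rw [if_neg h3, if_neg (fun h => h3 (hiff.mp h).2.2)]

theorem bFold_eq (mt : List PVMeta) (i : Int) (w4 : PySem.Set String) (ag : String)
    (js : List Int) :
    List.foldl (bInner mt i w4 ag) [] js = js.filter (hitBb mt i w4 ag) := by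
  rw [show bInner mt i w4 ag = fun out j => if hitBb mt i w4 ag j then out ++ [j] else out from
    funext₂ (bInner_eq mt i w4 ag)]
  exact (PySem.List.foldl_append_if (hitBb mt i w4 ag) id js []).trans (by simp)

theorem inter_len_comm (s t : List String) (hs : s.Nodup) (ht : t.Nodup) :
    PySem.Set.len (PySem.Set.inter s t) = PySem.Set.len (PySem.Set.inter t s) := by
  have key : ∀ (a b : List String), a.Nodup →
      (List.filter (fun x => PySem.Set.contains b x) a).length = (a.toFinset ∩ b.toFinset).card := by
    intro a b ha
    rw [← List.toFinset_card_of_nodup (ha.filter _)]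
    congr 1
    ext x
    simp [PySem.Set.contains]
  simp only [PySem.Set.inter, PySem.Set.len]
  rw [key s t hs, key t s ht, Finset.inter_comm]

theorem dflt_eq : pvMetaDflt = bMeta [] := by rfl

theorem slice4_eq (l : List String) : PySem.List.slice l none (some 4) = l.take 4 := by
  rw [PySem.List.slice_to _ (by norm_num : (0:Int) ≤ 4)]
  rfl

theorem titleOk_sym (t1 t2 : String) :
    2 ≤ PySem.Set.len (PySem.Set.inter
        (PySem.Set.ofList (PySem.List.slice (PySem.Str.split₀
          (if PySem.Str.len t1 ≤ PySem.Str.len t2 then t1 else t2)) none (some 4)))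
        (PySem.Set.ofList (PySem.List.slice (PySem.Str.split₀
          (if PySem.Str.len t1 ≤ PySem.Str.len t2 then t2 else t1)) none (some 4)))) ↔
      2 ≤ PySem.Set.len (PySem.Set.inter
        (PySem.Set.ofList ((PySem.Str.split₀ t1).take 4))
        (PySem.Set.ofList ((PySem.Str.split₀ t2).take 4))) := by
  by_cases h : PySem.Str.len t1 ≤ PySem.Str.len t2
  · rw [if_pos h, if_pos h, slice4_eq, slice4_eq]
  · rw [if_neg h, if_neg h, slice4_eq, slice4_eq,
      inter_len_comm _ _ (PySem.Set.nodup_ofList _) (PySem.Set.nodup_ofList _)]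

theorem pointwise (findings : List (List (String × String))) (i : Int)
    (f1 : List (String × String)) (j : Int) (ht : 5 < PySem.Str.len (pvTitle f1)) :
    (hitBb (findings.map bMeta) i
        (PySem.Set.ofList ((PySem.Str.split₀ (pvTitle f1)).take 4)) (pvAgent f1) j
      && ovlB findings f1 j) =
      hitAb f1 i (j, PySem.List.pyGetD findings j []) := by
  have hmj : PySem.List.pyGetD (findings.map bMeta) j pvMetaDflt =
      bMeta (PySem.List.pyGetD findings j []) := by
    rw [dflt_eq]
    exact PySem.List.pyGetD_map bMeta findings j []
  rw [Bool.eq_iff_iff]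
  simp only [Bool.and_eq_true, hitBb, hitAb, decide_eq_true_eq, hmj, ovlB, Bool.not_eq_true',
    bMeta]
  constructor
  · rintro ⟨⟨h1, h2, h5, h6⟩, h3⟩
    exact ⟨fun h => h1 h.symm, h2, h3,
      ht, h5, (titleOk_sym (pvTitle f1) (pvTitle (PySem.List.pyGetD findings j []))).mpr h6⟩
  · rintro ⟨h1, h2, h3, h4, h5, h6⟩
    exact ⟨⟨fun h => h1 h.symm, h2, h5,
      (titleOk_sym (pvTitle f1) (pvTitle (PySem.List.pyGetD findings j []))).mp h6⟩, h3⟩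

theorem rowA_range (findings : List (List (String × String))) (i : Int)
    (f1 : List (String × String)) :
    rowA findings i f1 =
      (PySem.List.pyRange 0 (PySem.List.len findings)).filter
        (fun j => hitAb f1 i (j, PySem.List.pyGetD findings j [])) := by
  unfold rowA
  rw [PySem.List.enumerate_eq_map_pyRange findings [], List.filter_map, List.map_map]
  exact List.map_id _

theorem row_eq (findings : List (List (String × String))) (i : Int)
    (f1 : List (String × String)) :
    (if PySem.Str.len (pvTitle f1) ≤ 5 then [] else
      List.foldl (bInner (findings.map bMeta) i
          (PySem.Set.ofList ((PySem.Str.split₀ (pvTitle f1)).take 4)) (pvAgent f1)) []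
        (PySem.List.sorted (candOf findings f1) (fun x => x))) = rowA findings i f1 := by
  by_cases ht : PySem.Str.len (pvTitle f1) ≤ 5
  · rw [if_pos ht]
    symm
    unfold rowA
    rw [List.filter_eq_nil_iff.mpr (fun q _ => by
      simp only [hitAb, decide_eq_true_eq, not_and]
      intro _ _ _ h5
      omega)]
    rfl
  · rw [if_neg ht, bFold_eq, sorted_cand, List.filter_filter, rowA_range]
    exact List.filter_congr (fun j _ => pointwise findings i f1 j (by omega))

theorem portB_items (findings : List (List (String × String))) :
    detect_corroboration_py_alt findings =
      (PySem.List.enumerate findings).map (fun p => (p.1, rowA findings p.1 p.2)) := by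
  unfold detect_corroboration_py_alt
  rw [bFirst_eq]
  show (List.foldl (bOuter (List.map bMeta findings) (idx0 findings)) PySem.Dict.empty
      (PySem.List.enumerate (List.map bMeta findings))).items =
    (PySem.List.enumerate findings).map (fun p => (p.1, rowA findings p.1 p.2))
  have hout : bOuter (findings.map bMeta) (idx0 findings) =
      fun corro (p : Int × PVMeta) => corro.insert p.1
        (if p.2.2.1 ≤ 5 then [] else
          List.foldl (bInner (findings.map bMeta) p.1 p.2.2.2.1 p.2.2.2.2) []
            (PySem.List.sorted (List.foldl (fun c w => PySem.Set.update c ((idx0 findings).getD w []))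
              PySem.Set.empty p.2.1) (fun x => x))) :=
    funext₂ (fun corro p => (apply_ite (corro.insert p.1) _ _ _).symm)
  rw [hout]
  refine (PySem.Dict.items_foldl_insert_fresh (PySem.List.enumerate (findings.map bMeta))
      (fun p => p.1) _ PySem.Dict.empty (fun a _ => rfl)
      (by rw [PySem.List.map_fst_enumerate]; exact PySem.List.nodup_pyRange_one _ _)).trans ?_
  rw [show PySem.Dict.empty.items = ([] : List (Int × List Int)) from rfl, List.nil_append]
  rw [enumerate_map_pv bMeta findings 0, List.map_map]
  exact List.map_congr_left (fun p _ => congrArg (Prod.mk p.1) (row_eq findings p.1 p.2))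

-- ===== VERDICT (by name: the statement is the Claim_ definition above) =====
theorem detect_corroboration_py_spec : Claim_equal_detect_corroboration_py := by
  intro findings _
  unfold Spec_detect_corroboration_py
  exact (portA_items findings).trans (portB_items findings).symm
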